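-- pv_equiv track=rewrite | github.com/mushimuro/AlphaO | renju_rule.py | make_five_row
-- ===== SOURCE A (Python) =====
-- def make_five_row(line):
--     for i in range(len(line)):
--         if line[i] == 0:
--             line[i] = 1
--             count = 0
--             for stone in line:
--                 if stone == 1:
--                     count += 1
--                     if count == 5:
--                         return True
--                 else:
--                     count = 0
--             line[i] = 0
--     return False
-- ===== SOURCE B (Python) =====
-- def make_five_row(line):
--     # Single pass: a stone on an empty cell completes five in a row iff the
--     # line has an empty cell and some length-5 window has no blocker and at most
--     # one empty cell.
--     if 0 not in line:
--         return False
--     for j in range(len(line) - 4):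
--         w = line[j:j + 5]
--         if all(v == 0 or v == 1 for v in w) and w.count(0) <= 1:
--             return True
--     return False
-- ===== Notes on version B (the rewrite author's own statement) =====
-- stated objective: alternative
-- what changed: Replaces A's try-each-empty-cell-then-rescan-the-whole-line nested loops by one guard (the line has an empty cell) plus a single pass over all length-5 windows, accepting a window whose cells are all 0/1 with at most one 0.
import Mathlib
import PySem

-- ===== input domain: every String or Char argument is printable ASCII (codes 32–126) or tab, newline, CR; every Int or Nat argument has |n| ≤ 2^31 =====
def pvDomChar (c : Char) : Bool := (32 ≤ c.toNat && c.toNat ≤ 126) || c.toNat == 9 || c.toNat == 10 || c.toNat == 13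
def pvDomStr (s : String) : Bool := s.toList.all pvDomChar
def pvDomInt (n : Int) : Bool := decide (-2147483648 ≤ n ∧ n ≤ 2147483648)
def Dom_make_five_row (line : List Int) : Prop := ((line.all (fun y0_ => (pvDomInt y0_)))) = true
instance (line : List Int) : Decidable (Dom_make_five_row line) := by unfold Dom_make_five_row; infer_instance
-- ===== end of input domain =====

-- B replaces A's try-each-empty-cell-and-rescan-the-line nested loops by one pass over all
-- length-5 windows; A temporarily mutates `line` (and leaves line[i]=1 when it returns True) —
-- the equivalence proved here is about the return value only; B does not mutate.

-- ===== PORT A =====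
-- inner scan of A: count consecutive stones equal to 1, return True when count reaches 5
def countScanA : List Int → Int → Bool
  | [], _ => false
  | stone :: rest, count =>
    if stone == 1 then
      if count + 1 == 5 then true else countScanA rest (count + 1)
    else countScanA rest 0

-- outer loop of A over i in range(len(line)); line[i] = 1 is modelled by line.set i 1
-- (A restores line[i] = 0 afterwards, so each scan sees exactly line.set i 1)
def goA (line : List Int) : List Nat → Bool
  | [] => false
  | i :: is =>
    if line.getD i 0 == 0 then
      if countScanA (line.set i 1) 0 then true else goA line is
    else goA line is

def make_five_row (line : List Int) : Bool :=
  goA line (List.range line.length)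

-- ===== PORT B =====
def make_five_row_alt (line : List Int) : Bool :=
  if line.contains 0 then
    (List.range (line.length - 4)).any (fun j =>
      let w := (line.drop j).take 5      -- line[j:j+5]; j + 5 ≤ line.length here, so exact
      w.all (fun v => v == 0 || v == 1) && decide (w.count 0 ≤ 1))
  else false

-- ===== PRECONDITION & SPEC =====
def Spec_make_five_row (line : List Int) (out : Bool) : Prop := out = make_five_row_alt line
instance (line : List Int) (out : Bool) : Decidable (Spec_make_five_row line out) := by unfold Spec_make_five_row; infer_instance

-- ===== CLAIM (what is proved, stated in full; the proofs are below) =====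
def Claim_equal_make_five_row : Prop := ∀ (line : List Int), Dom_make_five_row line → Spec_make_five_row line (make_five_row line)

-- ===== LEMMAS AND PROOFS =====

-- l contains five consecutive 1s
def HasR5 (l : List Int) : Prop := ∃ a b, l = a ++ List.replicate 5 (1:Int) ++ b

-- pointwise characterisation of A's result
def PW_A (line : List Int) : Prop :=
  ∃ i, i < line.length ∧ line.getD i 0 = 0 ∧ HasR5 (line.set i 1)

-- pointwise characterisation of B's result
def PW_B (line : List Int) : Prop :=
  (∃ i, i < line.length ∧ line.getD i 0 = 0) ∧
  ∃ j, j + 5 ≤ line.length ∧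
    (∀ k, k < 5 → line.getD (j+k) 0 = 0 ∨ line.getD (j+k) 0 = 1) ∧
    (∀ k k', k < 5 → k' < 5 → line.getD (j+k) 0 = 0 → line.getD (j+k') 0 = 0 → k = k')

lemma rep_prefix_hasR5 {k : Nat} {l : List Int} (h5 : 5 ≤ k)
    (h : List.replicate k (1:Int) <+: l) : HasR5 l := by
  obtain ⟨t, ht⟩ := h
  refine ⟨[], List.replicate (k-5) 1 ++ t, ?_⟩
  have : k = 5 + (k - 5) := by omega
  rw [this, List.replicate_add] at ht
  simpa using ht.symm

lemma hasR5_cons (s : Int) (rest : List Int) :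
    HasR5 (s :: rest) ↔ (s = 1 ∧ List.replicate 4 (1:Int) <+: rest) ∨ HasR5 rest := by
  constructor
  · rintro ⟨a, b, hab⟩
    cases a with
    | nil =>
      simp [List.replicate_succ] at hab
      exact Or.inl ⟨hab.1, b, hab.2.symm⟩
    | cons x a' =>
      simp at hab
      exact Or.inr ⟨a', b, by simpa using hab.2⟩
  · rintro (⟨rfl, t, ht⟩ | ⟨a, b, hab⟩)
    · exact ⟨[], t, by simp [List.replicate_succ, ← ht]⟩
    · exact ⟨s :: a, b, by simp [hab]⟩

lemma cs_iff : ∀ (l : List Int) (c : Int), 0 ≤ c → c ≤ 4 →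
    (countScanA l c = true ↔
      (∃ k : Nat, 5 ≤ c + k ∧ List.replicate k (1:Int) <+: l) ∨ HasR5 l) := by
  intro l
  induction l with
  | nil =>
    intro c h0 h4
    have hno : ¬ ((∃ k : Nat, 5 ≤ c + (k:Int) ∧ List.replicate k (1:Int) <+: ([]:List Int)) ∨ HasR5 []) := by
      rintro (⟨k, hk, hp⟩ | ⟨a, b, hab⟩)
      · have h1 := List.prefix_nil.mp hp
        have : k = 0 := by simpa [List.replicate_eq_nil_iff] using h1
        omega
      · cases a <;> simp_all
    simp only [countScanA, Bool.false_eq_true, false_iff]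
    exact hno
  | cons s rest ih =>
    intro c h0 h4
    simp only [countScanA]
    by_cases hs : s = 1
    · subst hs
      simp only [beq_self_eq_true, if_true]
      by_cases hc5 : c + 1 = 5
      · have hc : c = 4 := by omega
        subst hc
        simp only [hc5]
        norm_num
        exact Or.inl ⟨1, by norm_num, ⟨rest, by simp [List.replicate_succ]⟩⟩
      · have : (c + 1 == 5) = false := by simpa using hc5
        rw [this]
        simp only [Bool.false_eq_true, if_false]
        rw [ih (c+1) (by omega) (by omega)]
        rw [hasR5_cons]
        constructor
        · rintro (⟨k, hk, hp⟩ | h)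
          · refine Or.inl ⟨k+1, by omega, ?_⟩
            rw [List.replicate_succ]
            exact List.cons_prefix_cons.mpr ⟨rfl, hp⟩
          · exact Or.inr (Or.inr h)
        · rintro (⟨k, hk, hp⟩ | (⟨_, hp⟩ | h))
          · match k, hp with
            | 0, hp => omega
            | k'+1, hp =>
              simp [List.replicate_succ, List.cons_prefix_cons] at hp
              exact Or.inl ⟨k', by omega, hp⟩
          · exact Or.inl ⟨4, by omega, hp⟩
          · exact Or.inr h
    · have : (s == 1) = false := by simpa using hs
      rw [this]
      simp only [Bool.false_eq_true, if_false]
      rw [ih 0 le_rfl (by norm_num)]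
      rw [hasR5_cons]
      constructor
      · rintro (⟨k, hk, hp⟩ | h)
        · exact Or.inr (Or.inr (rep_prefix_hasR5 (by omega) hp))
        · exact Or.inr (Or.inr h)
      · rintro (⟨k, hk, hp⟩ | (⟨h1, _⟩ | h))
        · match k, hp with
          | 0, hp => omega
          | k'+1, hp =>
            simp [List.replicate_succ, List.cons_prefix_cons] at hp
            exact absurd hp.1.symm hs
        · exact absurd h1 hs
        · exact Or.inr h

lemma checkFive_iff (l : List Int) : countScanA l 0 = true ↔ HasR5 l := by
  rw [cs_iff l 0 (by norm_num) (by norm_num)]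
  constructor
  · rintro (⟨k, hk, hp⟩ | h)
    · exact rep_prefix_hasR5 (by omega) hp
    · exact h
  · exact Or.inr

lemma hasR5_iff (l : List Int) :
    HasR5 l ↔ ∃ j, j + 5 ≤ l.length ∧ ∀ k, k < 5 → l.getD (j+k) 0 = 1 := by
  constructor
  · rintro ⟨a, b, rfl⟩
    refine ⟨a.length, by simp only [List.length_append, List.length_replicate]; omega, ?_⟩
    intro k hk
    rw [List.append_assoc, List.getD_eq_getElem?_getD,
      List.getElem?_append_right (by omega), Nat.add_sub_cancel_left,
      List.getElem?_append_left (by simpa using hk)]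
    simp [hk]
    interval_cases k <;> rfl
  · rintro ⟨j, hj, hall⟩
    refine ⟨l.take j, l.drop (j+5), ?_⟩
    have hmid : (l.drop j).take 5 = List.replicate 5 (1:Int) := by
      apply List.ext_getElem
      · simp; omega
      · intro k hk1 hk2
        simp only [List.getElem_take, List.getElem_drop, List.getElem_replicate]
        have hk5 : k < 5 := by simpa using hk2
        have := hall k hk5
        rwa [List.getD_eq_getElem _ _ (by omega)] at this
    have h2 : l.drop j = List.replicate 5 (1:Int) ++ l.drop (j+5) := by
      have h3 := List.take_append_drop 5 (l.drop j)
      rw [List.drop_drop, hmid] at h3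
      rw [← h3]
    calc l = l.take j ++ l.drop j := (List.take_append_drop j l).symm
      _ = l.take j ++ List.replicate 5 1 ++ l.drop (j+5) := by rw [h2, List.append_assoc]

lemma goA_iff (line : List Int) : ∀ is : List Nat,
    (goA line is = true ↔
      ∃ i ∈ is, line.getD i 0 = 0 ∧ countScanA (line.set i 1) 0 = true) := by
  intro is
  induction is with
  | nil => simp [goA]
  | cons i is ih =>
    simp only [goA]
    split_ifs with h1 h2
    · simp_all
    · simp_all
    · simp only [List.mem_cons]
      constructor
      · intro h; rcases ih.mp h with ⟨i', hmem, hv⟩; exact ⟨i', Or.inr hmem, hv⟩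
      · rintro ⟨i', (rfl | hmem), hv⟩
        · simp_all
        · exact ih.mpr ⟨i', hmem, hv⟩

lemma a_iff (line : List Int) : make_five_row line = true ↔ PW_A line := by
  rw [make_five_row, goA_iff]
  simp only [List.mem_range, PW_A]
  constructor
  · rintro ⟨i, hi, h0, hc⟩; exact ⟨i, hi, h0, (checkFive_iff _).mp hc⟩
  · rintro ⟨i, hi, h0, hc⟩; exact ⟨i, hi, h0, (checkFive_iff _).mpr hc⟩

lemma count_le_one_iff (l : List Int) (a : Int) :
    l.count a ≤ 1 ↔ ∀ (i j : Nat), i < l.length → j < l.length →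
      l.getD i 0 = a → l.getD j 0 = a → i = j := by
  induction l with
  | nil => simp
  | cons x t ih =>
    by_cases hx : x = a
    · subst hx
      simp only [List.count_cons_self]
      have hmem : (∀ (i j : Nat), i < (x :: t).length → j < (x :: t).length →
          (x :: t).getD i 0 = x → (x :: t).getD j 0 = x → i = j) ↔ x ∉ t := by
        constructor
        · intro h hmem
          obtain ⟨m, hm, hv⟩ := List.mem_iff_getElem.mp hmem
          have : (0:Nat) = m + 1 := by
            apply h 0 (m+1) (by simp) (by simp; omega) (by simp)
            rw [List.getD_cons_succ, List.getD_eq_getElem _ _ hm]; exact hv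
          omega
        · intro hnm i j hi hj hvi hvj
          match i, j with
          | 0, 0 => rfl
          | 0, j'+1 =>
            exfalso; apply hnm
            have hj' : j' < t.length := by simpa using hj
            rw [List.getD_cons_succ, List.getD_eq_getElem _ _ hj'] at hvj
            exact hvj ▸ List.getElem_mem hj'
          | i'+1, 0 =>
            exfalso; apply hnm
            have hi' : i' < t.length := by simpa using hi
            rw [List.getD_cons_succ, List.getD_eq_getElem _ _ hi'] at hvi
            exact hvi ▸ List.getElem_mem hi'
          | i'+1, j'+1 =>
            exfalso; apply hnm
            have hi' : i' < t.length := by simpa using hi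
            rw [List.getD_cons_succ, List.getD_eq_getElem _ _ hi'] at hvi
            exact hvi ▸ List.getElem_mem hi'
      rw [hmem]
      constructor
      · intro h
        have : t.count x = 0 := by omega
        simpa using List.count_eq_zero.mp this
      · intro h
        have : t.count x = 0 := List.count_eq_zero.mpr h
        omega
    · rw [List.count_cons_of_ne (fun h => hx h)]
      rw [ih]
      constructor
      · intro h i j hi hj hvi hvj
        match i, j with
        | 0, 0 => rfl
        | 0, j'+1 => exact absurd (by simpa using hvi) hx
        | i'+1, 0 => exact absurd (by simpa using hvj) hx
        | i'+1, j'+1 =>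
          have := h i' j' (by simpa using hi) (by simpa using hj)
            (by simpa using hvi) (by simpa using hvj)
          omega
      · intro h i j hi hj hvi hvj
        have := h (i+1) (j+1) (by simp; omega) (by simp; omega)
          (by simpa using hvi) (by simpa using hvj)
        omega

lemma mem_zero_iff (line : List Int) :
    (0:Int) ∈ line ↔ ∃ i, i < line.length ∧ line.getD i 0 = 0 := by
  rw [List.mem_iff_getElem]
  constructor
  · rintro ⟨i, hi, hv⟩; exact ⟨i, hi, by rw [List.getD_eq_getElem _ _ hi]; exact hv⟩
  · rintro ⟨i, hi, hv⟩; exact ⟨i, hi, by rw [List.getD_eq_getElem _ _ hi] at hv; exact hv⟩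

lemma window_iff (line : List Int) (j : Nat) (hj5 : j + 5 ≤ line.length) :
    (((line.drop j).take 5).all (fun v => v == 0 || v == 1) &&
      decide (((line.drop j).take 5).count 0 ≤ 1)) = true ↔
    (∀ k, k < 5 → line.getD (j+k) 0 = 0 ∨ line.getD (j+k) 0 = 1) ∧
    (∀ k k', k < 5 → k' < 5 → line.getD (j+k) 0 = 0 → line.getD (j+k') 0 = 0 → k = k') := by
  set w := (line.drop j).take 5 with hw
  have hlen : w.length = 5 := by simp [hw]; omega
  have wget : ∀ k, k < 5 → w.getD k 0 = line.getD (j+k) 0 := by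
    intro k hk
    rw [hw, List.getD_eq_getElem _ _ (by simp; omega), List.getElem_take,
      List.getElem_drop, List.getD_eq_getElem _ _ (by omega)]
  rw [Bool.and_eq_true, List.all_eq_true, decide_eq_true_eq, count_le_one_iff]
  constructor
  · rintro ⟨hall, huniq⟩
    constructor
    · intro k hk
      have hmem : w.getD k 0 ∈ w := by
        rw [List.getD_eq_getElem _ _ (by omega)]; exact List.getElem_mem _
      have hv := hall _ hmem
      rw [wget k hk] at hv
      simpa using hv
    · intro k k' hk hk' h0 h0'
      exact huniq k k' (by omega) (by omega)
        (by rw [wget k hk]; exact h0) (by rw [wget k' hk']; exact h0')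
  · rintro ⟨hall, huniq⟩
    constructor
    · intro v hv
      obtain ⟨k, hk, rfl⟩ := List.mem_iff_getElem.mp hv
      have hg : w.getD k 0 = w[k] := List.getD_eq_getElem _ _ hk
      rcases hall k (by omega) with h | h <;>
        · rw [← wget k (by omega), hg] at h
          simp [h]
    · intro i j' hi hj' hvi hvj'
      rw [wget i (by omega)] at hvi
      rw [wget j' (by omega)] at hvj'
      exact huniq i j' (by omega) (by omega) hvi hvj'

lemma b_iff (line : List Int) : make_five_row_alt line = true ↔ PW_B line := by
  unfold make_five_row_alt PW_B
  rw [← mem_zero_iff]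
  by_cases hc : (0:Int) ∈ line
  · rw [if_pos (by simpa using hc)]
    simp only [hc, true_and]
    rw [List.any_eq_true]
    constructor
    · rintro ⟨j, hj, hcond⟩
      rw [List.mem_range] at hj
      have hj5 : j + 5 ≤ line.length := by omega
      exact ⟨j, hj5, (window_iff line j hj5).mp hcond⟩
    · rintro ⟨j, hj5, h1, h2⟩
      exact ⟨j, List.mem_range.mpr (by omega), (window_iff line j hj5).mpr ⟨h1, h2⟩⟩
  · rw [if_neg (by simpa using hc)]
    simp [hc]

lemma getD_set_ne (l : List Int) (i m : Nat) (x : Int) (h : m ≠ i) :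
    (l.set i x).getD m 0 = l.getD m 0 := by
  simp [List.getD_eq_getElem?_getD, (Ne.symm h : i ≠ m)]

lemma getD_set_self (l : List Int) (i : Nat) (x : Int) (h : i < l.length) :
    (l.set i x).getD i 0 = x := by
  simp [List.getD_eq_getElem?_getD, h]

lemma pw_equiv (line : List Int) : PW_A line ↔ PW_B line := by
  constructor
  · rintro ⟨i, hi, h0, hr⟩
    rw [hasR5_iff] at hr
    obtain ⟨j, hj5, hall⟩ := hr
    rw [List.length_set] at hj5
    refine ⟨⟨i, hi, h0⟩, j, hj5, ?_, ?_⟩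
    · intro k hk
      by_cases he : j + k = i
      · left; rw [he]; exact h0
      · right
        rw [← getD_set_ne line i (j+k) 1 he]
        exact hall k hk
    · intro k k' hk hk' hv hv'
      have h1 : j + k = i := by
        by_contra he
        rw [← getD_set_ne line i (j+k) 1 he, hall k hk] at hv
        norm_num at hv
      have h2 : j + k' = i := by
        by_contra he
        rw [← getD_set_ne line i (j+k') 1 he, hall k' hk'] at hv'
        norm_num at hv'
      omega
  · rintro ⟨⟨i0, hi0, h00⟩, j, hj5, hok, huniq⟩
    by_cases hz : ∃ k, k < 5 ∧ line.getD (j+k) 0 = 0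
    · obtain ⟨k0, hk0, h0⟩ := hz
      refine ⟨j + k0, by omega, h0, ?_⟩
      rw [hasR5_iff]
      refine ⟨j, by rw [List.length_set]; omega, ?_⟩
      intro k hk
      by_cases he : j + k = j + k0
      · rw [he]; exact getD_set_self line (j+k0) 1 (by omega)
      · rw [getD_set_ne line (j+k0) (j+k) 1 he]
        rcases hok k hk with h | h
        · exact absurd (huniq k k0 hk hk0 h h0) (by omega)
        · exact h
    · push Not at hz
      refine ⟨i0, hi0, h00, ?_⟩
      rw [hasR5_iff]
      refine ⟨j, by rw [List.length_set]; omega, ?_⟩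
      intro k hk
      have hne : j + k ≠ i0 := by
        intro he
        exact hz k hk (he ▸ h00)
      rw [getD_set_ne line i0 (j+k) 1 hne]
      rcases hok k hk with h | h
      · exact absurd h (hz k hk)
      · exact h

-- ===== VERDICT (by name: the statement is the Claim_ definition above) =====
theorem make_five_row_spec : Claim_equal_make_five_row := by
  intro line _
  unfold Spec_make_five_row
  rw [Bool.eq_iff_iff, a_iff, b_iff]
  exact pw_equiv line
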